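-- pv_equiv track=rewrite | github.com/trevorvanhoof/MayaAPIWrappers | Generate.py | findFirstOf
-- ===== SOURCE A (Python) =====
-- def findFirstOf(data, options, startAt):
--     result = len(data)
--     resultI = -1
--     for i, option in enumerate(options):
--         index = data.find(option, startAt)
--         if index == -1: continue
--         if index < result:
--             result = index
--             resultI = i
--     if resultI != -1:
--         return result, resultI
--     return None
-- ===== SOURCE B (Python) =====
-- def findFirstOf(data, options, startAt):
--     # Single left-to-right scan over positions: at each position try the options
--     # in order; the first position with a match gives the answer directly.
--     n = len(data)
--     start = startAt
--     if start < 0: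
--         start += n
--         if start < 0:
--             start = 0
--     for p in range(start, n):
--         for i, option in enumerate(options):
--             if data[p:p + len(option)] == option:
--                 return p, i
--     return None
-- ===== Notes on version B (the rewrite author's own statement) =====
-- stated objective: faster
-- what changed: Instead of running a separate str.find over the whole string for every option and keeping a running minimum with tie-breaking state, B does one left-to-right scan over positions from the (clamped) start and returns at the first position where any option matches, trying options in list order so the tie-break is identical.
import Mathlib
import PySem

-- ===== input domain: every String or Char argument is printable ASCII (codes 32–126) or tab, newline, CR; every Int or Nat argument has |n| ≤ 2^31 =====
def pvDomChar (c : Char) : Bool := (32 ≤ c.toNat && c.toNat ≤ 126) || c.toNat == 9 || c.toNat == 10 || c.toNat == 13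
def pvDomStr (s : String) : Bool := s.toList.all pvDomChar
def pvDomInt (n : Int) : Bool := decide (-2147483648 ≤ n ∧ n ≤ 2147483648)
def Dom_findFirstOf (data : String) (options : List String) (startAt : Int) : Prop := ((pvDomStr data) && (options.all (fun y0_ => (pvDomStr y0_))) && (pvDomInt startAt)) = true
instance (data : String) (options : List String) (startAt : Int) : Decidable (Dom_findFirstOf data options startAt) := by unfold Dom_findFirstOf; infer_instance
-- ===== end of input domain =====

-- B replaces A's per-option full str.find scans by one left-to-right scan over
-- positions that stops at the first position where any option matches (early exit;
-- measurably faster on a timing run's inputs).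

-- ===== PORT A =====
def findFirstOf (data : String) (options : List String) (startAt : Int) : Option (List Int) :=
  let st := (PySem.List.enumerate options).foldl
    (fun (st : Int × Int) p =>
      let index := PySem.Str.findFrom data p.2 startAt none
      if index = -1 then st
      else if index < st.1 then (index, p.1) else st)
    (PySem.Str.len data, -1)
  if st.2 ≠ -1 then some [st.1, st.2] else none

-- ===== PORT B =====
-- inner loop of Source B: 'for i, option in enumerate(options): if data[p:p+len(option)] == option: return i'
def altInner (data : List Char) (p : Int) : List (Int × String) → Option Int
  | [] => none
  | q :: rest =>
      if PySem.List.slice data (some p) (some (p + PySem.Str.len q.2)) = q.2.toList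
      then some q.1 else altInner data p rest

-- outer loop of Source B: 'for p in range(start, n): …'
def altScan (data : List Char) (opts : List (Int × String)) : List Int → Option (List Int)
  | [] => none
  | p :: ps =>
    match altInner data p opts with
    | some i => some [p, i]
    | none => altScan data opts ps

def findFirstOf_alt (data : String) (options : List String) (startAt : Int) : Option (List Int) :=
  let n := PySem.Str.len data
  let start := if startAt < 0 then (if startAt + n < 0 then 0 else startAt + n) else startAt
  altScan data.toList (PySem.List.enumerate options) (PySem.List.pyRange start n 1)

-- ===== PRECONDITION & SPEC =====
def Spec_findFirstOf (data : String) (options : List String) (startAt : Int) (out : Option (List Int)) : Prop := out = findFirstOf_alt data options startAt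
instance (data : String) (options : List String) (startAt : Int) (out : Option (List Int)) : Decidable (Spec_findFirstOf data options startAt out) := by unfold Spec_findFirstOf; infer_instance

-- ===== CLAIM (what is proved, stated in full; the proofs are below) =====
def Claim_equal_findFirstOf : Prop := ∀ (data : String) (options : List String) (startAt : Int), Dom_findFirstOf data options startAt → Spec_findFirstOf data options startAt (findFirstOf data options startAt)

-- ===== LEMMAS AND PROOFS =====

-- A's loop body, at the List Char level, with an arbitrary (already clamped) start s
def stp (L : List Char) (s : Int) (st : Int × Int) (q : Int × String) : Int × Int :=
  let index := PySem.Chars.findFrom L q.2.toList s none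
  if index = -1 then st
  else if index < st.1 then (index, q.1) else st

theorem enumerate_ge {α : Type} (xs : List α) (s0 : Int) (q : Int × α)
    (h : q ∈ PySem.List.enumerate xs s0) : s0 ≤ q.1 := by
  induction xs generalizing s0 with
  | nil => simp [PySem.List.enumerate] at h
  | cons x t ih =>
    simp only [PySem.List.enumerate, List.mem_cons] at h
    rcases h with h | h
    · subst h; simp
    · have := ih (s0 + 1) h; omega

theorem fold_no_update (L : List Char) (s : Int) (l : List (Int × String)) (st : Int × Int)
    (h : ∀ q ∈ l, PySem.Chars.findFrom L q.2.toList s none = -1 ∨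
                  st.1 ≤ PySem.Chars.findFrom L q.2.toList s none) :
    List.foldl (stp L s) st l = st := by
  induction l with
  | nil => rfl
  | cons q rest ih =>
    have hq := h q (List.mem_cons_self ..)
    have hrest : ∀ q' ∈ rest, _ := fun q' hq' => h q' (List.mem_cons_of_mem _ hq')
    simp only [List.foldl_cons]
    have hst : stp L s st q = st := by
      unfold stp
      rcases hq with hq | hq
      · simp [hq]
      · have hlt : ¬ PySem.Chars.findFrom L q.2.toList s none < st.1 := by omega
        simp [hlt]
    rw [hst]; exact ih hrest

theorem fold_congr_start (L : List Char) (s s' : Int) (l : List (Int × String)) (st : Int × Int)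
    (h : ∀ q ∈ l, PySem.Chars.findFrom L q.2.toList s none
                = PySem.Chars.findFrom L q.2.toList s' none) :
    List.foldl (stp L s) st l = List.foldl (stp L s') st l := by
  induction l generalizing st with
  | nil => rfl
  | cons q rest ih =>
    simp only [List.foldl_cons]
    have hq := h q (List.mem_cons_self ..)
    have : stp L s st q = stp L s' st q := by unfold stp; rw [hq]
    rw [this]; exact ih _ (fun q' hq' => h q' (List.mem_cons_of_mem _ hq'))

-- F1: a findFrom value from natural start s is -1 or lies in [s, n]
theorem findFrom_range (L : List Char) (opt : List Char) (s : Nat) (hs : s ≤ L.length) :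
    PySem.Chars.findFrom L opt (s : Int) none = -1 ∨
    ((s : Int) ≤ PySem.Chars.findFrom L opt (s : Int) none ∧
     PySem.Chars.findFrom L opt (s : Int) none ≤ L.length) := by
  rw [PySem.Chars.findFrom_natCast L opt s hs]
  by_cases h : PySem.Chars.find (List.drop s L) opt = -1
  · simp [h]
  · right
    have h1 := PySem.Chars.neg_one_le_find (List.drop s L) opt
    have h2 := PySem.Chars.find_le_length (List.drop s L) opt
    have h3 : (List.drop s L).length = L.length - s := by simp
    simp only [h, if_false]
    constructor <;> omega

-- F2: the findFrom value is exactly s iff opt matches at position s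
theorem findFrom_eq_start_iff (L : List Char) (opt : List Char) (s : Nat) (hs : s ≤ L.length) :
    PySem.Chars.findFrom L opt (s : Int) none = (s : Int) ↔ opt <+: List.drop s L := by
  rw [PySem.Chars.findFrom_natCast L opt s hs]
  constructor
  · intro h
    by_cases hf : PySem.Chars.find (List.drop s L) opt = -1
    · rw [if_pos hf] at h; exact absurd h (by omega)
    · simp only [hf, if_false] at h
      have hz : PySem.Chars.find (List.drop s L) opt = 0 := by omega
      have h0 : (0:Int) ≤ PySem.Chars.find (List.drop s L) opt := by omega
      have := (PySem.Chars.find_spec h0).1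
      rwa [hz] at this
  · intro h
    have hf : PySem.Chars.find (List.drop s L) opt ≠ -1 :=
      (PySem.Chars.find_ne_neg_one_iff _ _).2 h.isInfix
    have h0 : (0:Int) ≤ PySem.Chars.find (List.drop s L) opt := by
      have := PySem.Chars.neg_one_le_find (List.drop s L) opt; omega
    have hspec := PySem.Chars.find_spec h0
    have hz : PySem.Chars.find (List.drop s L) opt = 0 := by
      by_contra hnz
      exact hspec.2 0 (by omega) (by simpa using h)
    simp [hz]

-- F3: if opt does not match at s, searching from s and from s+1 agree
theorem infix_of_prefix_drop {opt X : List Char} {j : Nat} (h : opt <+: List.drop j X) :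
    opt <:+: X :=
  h.isInfix.trans (List.drop_suffix j X).isInfix

-- F3: if opt does not match at s, searching from s and from s+1 agree
theorem findFrom_succ (L : List Char) (opt : List Char) (s : Nat) (hs : s < L.length)
    (h : ¬ opt <+: List.drop s L) :
    PySem.Chars.findFrom L opt (s : Int) none
      = PySem.Chars.findFrom L opt ((s : Int) + 1) none := by
  have hs1 : s + 1 ≤ L.length := hs
  have hcast : ((s : Int) + 1) = ((s + 1 : Nat) : Int) := by push_cast; ring
  rw [PySem.Chars.findFrom_natCast L opt s (le_of_lt hs), hcast,
      PySem.Chars.findFrom_natCast L opt (s+1) hs1]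
  set a := PySem.Chars.find (List.drop s L) opt with ha
  set b := PySem.Chars.find (List.drop (s+1) L) opt with hb
  have hdd : ∀ (j j' : Nat), j + j' = j' + j → (List.drop j (List.drop j' L)) = List.drop (j' + j) L := by
    intro j j' _; rw [List.drop_drop]
  by_cases hbcase : b = -1
  · -- no match from s+1; then none from s either (position s itself is excluded by h)
    have hnib : ¬ opt <:+: List.drop (s+1) L := (PySem.Chars.find_eq_neg_one_iff _ _).1 hbcase
    have hnia : ¬ opt <:+: List.drop s L := by
      intro hia
      obtain ⟨j, hj⟩ := (PySem.Chars.exists_prefix_drop_iff_isIn opt (List.drop s L)).2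
        ((PySem.Chars.isIn_iff_infix _ _).2 hia)
      rw [List.drop_drop] at hj
      rcases Nat.eq_zero_or_pos j with hj0 | hjpos
      · subst hj0; simp at hj; exact h hj
      · apply hnib
        apply infix_of_prefix_drop (j := j - 1)
        rw [List.drop_drop]
        have heq : s + 1 + (j - 1) = s + j := by omega
        rwa [heq]
    have hacase : a = -1 := (PySem.Chars.find_eq_neg_one_iff _ _).2 hnia
    simp [hacase, hbcase]
  · -- match from s+1 at offset b; then the first match from s is at offset b+1
    have hble : -1 ≤ b := PySem.Chars.neg_one_le_find _ _
    have hb0 : (0:Int) ≤ b := by omega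
    have hbspec := PySem.Chars.find_spec hb0
    rw [← hb] at hbspec
    have hprefb : opt <+: List.drop (s + 1 + b.toNat) L := by
      have := hbspec.1; rwa [List.drop_drop] at this
    have hia : opt <:+: List.drop s L := by
      apply infix_of_prefix_drop (j := b.toNat + 1)
      rw [List.drop_drop]
      have heq : s + (b.toNat + 1) = s + 1 + b.toNat := by omega
      rwa [heq]
    have hacase : a ≠ -1 := (PySem.Chars.find_ne_neg_one_iff _ _).2 hia
    have hale : -1 ≤ a := PySem.Chars.neg_one_le_find _ _
    have ha0 : (0:Int) ≤ a := by omega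
    have haspec := PySem.Chars.find_spec ha0
    rw [← ha] at haspec
    have haprefix : opt <+: List.drop (s + a.toNat) L := by
      have := haspec.1; rwa [List.drop_drop] at this
    -- a.toNat ≠ 0 since no match at s
    have hane : a.toNat ≠ 0 := by
      intro h0
      apply h; rw [h0, Nat.add_zero] at haprefix; exact haprefix
    -- minimality of b at a.toNat - 1
    have hble2 : b.toNat ≤ a.toNat - 1 := by
      by_contra hlt
      apply hbspec.2 (a.toNat - 1) (by omega)
      rw [List.drop_drop]
      have heq : s + 1 + (a.toNat - 1) = s + a.toNat := by omega
      rwa [heq]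
    -- minimality of a at b.toNat + 1
    have hale2 : a.toNat ≤ b.toNat + 1 := by
      by_contra hlt
      apply haspec.2 (b.toNat + 1) (by omega)
      rw [List.drop_drop]
      have heq : s + (b.toNat + 1) = s + 1 + b.toNat := by omega
      rwa [heq]
    have hab : a = b + 1 := by omega
    have hne : ¬ (b + 1 = -1) := by omega
    simp only [hbcase, if_false, hab, hne]
    push_cast
    ring

-- altInner's test at position s is exactly 'opt matches at s'
theorem altInner_test_iff (L : List Char) (opt : String) (s : Nat) :
    (PySem.List.slice L (some (s : Int)) (some ((s : Int) + PySem.Str.len opt)) = opt.toList)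
      ↔ opt.toList <+: List.drop s L := by
  rw [PySem.Str.len_eq, PySem.List.slice_natCast_add]
  rw [List.prefix_iff_eq_take]
  exact eq_comm

theorem altInner_none (L : List Char) (p : Int) (l : List (Int × String))
    (h : altInner L p l = none) :
    ∀ q ∈ l, ¬ (PySem.List.slice L (some p) (some (p + PySem.Str.len q.2)) = q.2.toList) := by
  induction l with
  | nil => simp
  | cons q rest ih =>
    intro q' hq'
    unfold altInner at h
    split_ifs at h with hm
    rcases List.mem_cons.1 hq' with h' | h'
    · subst h'; exact hm
    · exact ih h q' h'

theorem fold_hit (L : List Char) (s : Nat) (l : List (Int × String)) (i₀ : Int) :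
    ∀ (st : Int × Int), (s : Int) < st.1 →
    (∀ q ∈ l, PySem.Chars.findFrom L q.2.toList (s : Int) none = -1 ∨
              (s : Int) ≤ PySem.Chars.findFrom L q.2.toList (s : Int) none) →
    (∀ q ∈ l, (PySem.Chars.findFrom L q.2.toList (s : Int) none = (s : Int) ↔
               PySem.List.slice L (some (s:Int)) (some ((s:Int) + PySem.Str.len q.2)) = q.2.toList)) →
    altInner L (s : Int) l = some i₀ →
    List.foldl (stp L (s : Int)) st l = ((s : Int), i₀) := by
  induction l with
  | nil => intro st _ _ _ h; simp [altInner] at h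
  | cons q rest ih =>
    intro st hst hrange hiff hinner
    have hrange' := fun q' hq' => hrange q' (List.mem_cons_of_mem _ hq')
    have hiff' := fun q' hq' => hiff q' (List.mem_cons_of_mem _ hq')
    unfold altInner at hinner
    simp only [List.foldl_cons]
    split_ifs at hinner with hm
    · -- q matches at s: the fold takes value (s, q.1) and never improves on it
      have hgs : PySem.Chars.findFrom L q.2.toList (s : Int) none = (s : Int) :=
        (hiff q (List.mem_cons_self ..)).2 hm
      have hq1 : stp L (s : Int) st q = ((s : Int), q.1) := by
        unfold stp
        have hne : ((s:Int)) ≠ -1 := by omega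
        simp [hgs, hne, hst]
      rw [hq1]
      have : List.foldl (stp L (s:Int)) ((s:Int), q.1) rest = ((s:Int), q.1) := by
        apply fold_no_update
        intro q' hq'
        rcases hrange' q' hq' with h | h
        · exact Or.inl h
        · exact Or.inr h
      rw [this]
      injection hinner with h; rw [h]
    · -- q does not match at s: its find value is -1 or > s; the invariant s < st.1 persists
      have hgs : PySem.Chars.findFrom L q.2.toList (s : Int) none ≠ (s : Int) := by
        intro hc; exact hm ((hiff q (List.mem_cons_self ..)).1 hc)
      have hq := hrange q (List.mem_cons_self ..)
      have hstep : stp L (s:Int) st q = st ∨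
          (stp L (s:Int) st q = (PySem.Chars.findFrom L q.2.toList (s:Int) none, q.1) ∧
           (s:Int) < PySem.Chars.findFrom L q.2.toList (s:Int) none) := by
        unfold stp
        rcases hq with h | h
        · left; simp [h]
        · by_cases h1 : PySem.Chars.findFrom L q.2.toList (s:Int) none < st.1
          · right
            have hne : PySem.Chars.findFrom L q.2.toList (s:Int) none ≠ -1 := by omega
            refine ⟨by simp [hne, h1], by omega⟩
          · left
            have hne : PySem.Chars.findFrom L q.2.toList (s:Int) none ≠ -1 := by omega
            simp [hne, h1]
      rcases hstep with hstq | ⟨hstq, hlt2⟩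
      · rw [hstq]; exact ih st hst hrange' hiff' hinner
      · rw [hstq]; exact ih _ hlt2 hrange' hiff' hinner

-- post-processing of A's final state
def postA (st : Int × Int) : Option (List Int) :=
  if st.2 ≠ -1 then some [st.1, st.2] else none

-- Main induction: from any natural start s ≤ n, A's fold and B's scan agree
theorem main_lemma (L : List Char) (l : List (Int × String))
    (hpos : ∀ q ∈ l, (0:Int) ≤ q.1) :
    ∀ (k s : Nat), s ≤ L.length → L.length - s ≤ k →
    postA (List.foldl (stp L (s : Int)) ((L.length : Int), -1) l)
      = altScan L l (PySem.List.pyRange (s : Int) (L.length : Int) 1) := by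
  intro k
  induction k with
  | zero =>
    intro s hs hk
    have hsn : s = L.length := by omega
    rw [PySem.List.pyRange_one_eq_nil (by omega)]
    have hfold : List.foldl (stp L (s : Int)) ((L.length : Int), -1) l
        = ((L.length : Int), -1) := by
      apply fold_no_update
      intro q hq
      rcases findFrom_range L q.2.toList s hs with h | h
      · exact Or.inl h
      · rw [← hsn]; exact Or.inr h.1
    rw [hfold]
    simp [postA, altScan]
  | succ k ih =>
    intro s hs hk
    rcases Nat.eq_or_lt_of_le hs with hsn | hlt
    · -- s = n : same as base case
      rw [PySem.List.pyRange_one_eq_nil (by omega)]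
      have hfold : List.foldl (stp L (s : Int)) ((L.length : Int), -1) l = ((L.length : Int), -1) := by
        apply fold_no_update
        intro q hq
        rcases findFrom_range L q.2.toList s hs with h | h
        · exact Or.inl h
        · rw [← hsn]; exact Or.inr h.1
      rw [hfold]; simp [postA, altScan]
    · rw [PySem.List.pyRange_one_cons (by exact_mod_cast hlt)]
      unfold altScan
      cases hinner : altInner L (s : Int) l with
      | some i₀ =>
        have hfold := fold_hit L s l i₀ ((L.length : Int), -1)
          (by show (s:Int) < ((L.length : Int)); exact_mod_cast hlt)
          (fun q hq => by
            rcases findFrom_range L q.2.toList s hs with h | h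
            · exact Or.inl h
            · exact Or.inr h.1)
          (fun q hq => by rw [findFrom_eq_start_iff L q.2.toList s hs,
                              altInner_test_iff L q.2 s])
          hinner
        rw [hfold]
        have hi0 : (0:Int) ≤ i₀ := by
          -- i₀ is one of the indices in l
          have : ∀ (l' : List (Int × String)), (∀ q ∈ l', (0:Int) ≤ q.1) →
              altInner L (s : Int) l' = some i₀ → (0:Int) ≤ i₀ := by
            intro l'
            induction l' with
            | nil => intro _ h; simp [altInner] at h
            | cons q rest ih' =>
              intro hp h
              unfold altInner at h
              split_ifs at h with hm
              · injection h with h; rw [← h]; exact hp q (List.mem_cons_self ..)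
              · exact ih' (fun q' hq' => hp q' (List.mem_cons_of_mem _ hq')) h
          exact this l hpos hinner
        simp only [postA]
        have : (i₀ : Int) ≠ -1 := by omega
        simp [this]
      | none =>
        -- no option matches at s: the fold from s equals the fold from s+1
        have hnom := altInner_none L (s : Int) l hinner
        have hcongr : List.foldl (stp L (s : Int)) ((L.length : Int), -1) l
            = List.foldl (stp L ((s : Int) + 1)) ((L.length : Int), -1) l := by
          apply fold_congr_start
          intro q hq
          have hnm : ¬ q.2.toList <+: List.drop s L := by
            intro hpre
            exact hnom q hq ((altInner_test_iff L q.2 s).2 hpre)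
          exact findFrom_succ L q.2.toList s hlt hnm
        rw [hcongr]
        have hcast : ((s : Int) + 1) = ((s + 1 : Nat) : Int) := by push_cast; ring
        rw [hcast]
        exact ih (s + 1) hlt (by omega)

-- findFrom is invariant under pre-clamping its start argument
theorem findFrom_clamp (L : List Char) (opt : List Char) (x y : Int) (hy : 0 ≤ y)
    (hxy : (if x < 0 then (if x + (L.length : Int) < 0 then 0 else x + L.length) else x) = y) :
    PySem.Chars.findFrom L opt x none = PySem.Chars.findFrom L opt y none := by
  simp only [PySem.Chars.findFrom]
  rw [if_neg (not_lt.2 hy), hxy]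

-- A's fold with Str-level primitives is the fold of stp (at List Char level)
theorem foldA_eq (data : String) (l : List (Int × String)) (startAt : Int) (st : Int × Int) :
    List.foldl
      (fun (st : Int × Int) p =>
        let index := PySem.Str.findFrom data p.2 startAt none
        if index = -1 then st
        else if index < st.1 then (index, p.1) else st) st l
    = List.foldl (stp data.toList startAt) st l := by
  apply PySem.List.foldl_congr_mem
  intro acc q _
  simp [stp, PySem.Str.findFrom_eq]

-- ===== VERDICT (by name: the statement is the Claim_ definition above) =====
theorem findFirstOf_spec : Claim_equal_findFirstOf := by
  intro data options startAt _
  unfold Spec_findFirstOf findFirstOf findFirstOf_alt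
  simp only [foldA_eq, PySem.Str.len]
  set L := data.toList with hL
  set l := PySem.List.enumerate options with hl
  have hpos : ∀ q ∈ l, (0:Int) ≤ q.1 := fun q hq => enumerate_ge options 0 q hq
  set start := if startAt < 0 then (if startAt + (L.length : Int) < 0 then 0 else startAt + L.length) else startAt with hstart
  have h0 : 0 ≤ start := by rw [hstart]; split_ifs <;> omega
  have hclamp : ∀ (st : Int × Int), List.foldl (stp L startAt) st l = List.foldl (stp L start) st l := by
    intro st
    apply fold_congr_start
    intro q _
    exact findFrom_clamp L q.2.toList startAt start h0 hstart.symm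
  rw [hclamp]
  by_cases hbig : (L.length : Int) < start
  · -- start past the end: A finds nothing, B's range is empty
    have hall : List.foldl (stp L start) ((L.length : Int), -1) l = ((L.length : Int), -1) := by
      apply fold_no_update
      intro q _
      left
      simp only [PySem.Chars.findFrom]
      split_ifs <;> first | rfl | omega
    rw [hall, PySem.List.pyRange_one_eq_nil (by omega)]
    simp [altScan]
  · -- start is a natural position ≤ n
    have hle : start ≤ (L.length : Int) := by omega
    have hcast : start = ((start.toNat : Nat) : Int) := by omega
    rw [hcast]
    have hmain := main_lemma L l hpos L.length start.toNat (by omega) (by omega)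
    unfold postA at hmain
    exact hmain
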